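-- pv_equiv track=rewrite | github.com/novoseiversia/eee111 | 6/ndigit_binary.py | ndigit_binary_z
-- ===== SOURCE A (Python) =====
-- def ndigit_binary_z(n: int, z: int) -> list[str]:
-- 	if n == 1:
-- 		if z == 0:
-- 			return ["1"]
-- 		elif z == 1:
-- 			return ["0"]
-- 		else:
-- 			return []
--
-- 	out: list[str] = []
-- 	for b in ndigit_binary_z(n - 1, z):
-- 		out.append(b + "1")
--
-- 	for b in ndigit_binary_z(n - 1, z - 1):
-- 		out.append(b + "0")
--
-- 	return out
-- ===== SOURCE B (Python) =====
-- def ndigit_binary_z(n: int, z: int) -> list[str]: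
--     if z < 0 or z > n:
--         return []  # a length-n string cannot have that many zeros
--     # row[k] = all current-length binary strings (same order as the recursion) with exactly k zeros
--     row = [["1"] if k == 0 else ["0"] if k == 1 else [] for k in range(z + 1)]
--     for _ in range(n - 1):
--         new_row = []
--         prev = []
--         for cur in row:
--             new_row.append([b + "1" for b in cur] + [b + "0" for b in prev])
--             prev = cur
--         row = new_row
--     return row[z]
-- ===== Notes on version B (the rewrite author's own statement) =====
-- stated objective: faster
-- what changed: Replaces the exponential top-down recursion (which recomputes every (m,k) subproblem many times) by a bottom-up DP keeping one row of lists indexed by zero-count, iterated n-1 times, plus an early [] for z<0 or z>n; intended as faster (timing: B ~9491x faster at the largest size both finished; on sizes where the output itself is exponentially large, both time out).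
import Mathlib
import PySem

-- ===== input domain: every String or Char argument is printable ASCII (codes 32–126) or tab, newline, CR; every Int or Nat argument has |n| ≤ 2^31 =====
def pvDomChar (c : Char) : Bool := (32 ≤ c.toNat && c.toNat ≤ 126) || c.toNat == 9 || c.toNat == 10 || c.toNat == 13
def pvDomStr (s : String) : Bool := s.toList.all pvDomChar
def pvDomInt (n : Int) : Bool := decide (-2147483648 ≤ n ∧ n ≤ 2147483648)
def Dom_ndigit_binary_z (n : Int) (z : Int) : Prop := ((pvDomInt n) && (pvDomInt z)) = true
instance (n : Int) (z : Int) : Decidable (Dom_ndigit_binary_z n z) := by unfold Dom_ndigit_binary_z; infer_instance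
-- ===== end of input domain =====

-- B replaces A's exponential recursion by a bottom-up DP row iterated n-1 times; intended as faster (measured ~9491x at the largest size both finished).

-- ===== PORT A =====
def ndigit_binary_z (n : Int) (z : Int) : List String :=
  if n = 1 then
    if z = 0 then ["1"]
    else if z = 1 then ["0"]
    else []
  else if n < 1 then []  -- Python recurses forever here (RecursionError); excluded by Pre_
  else
    let out := (ndigit_binary_z (n - 1) z).foldl (fun out b => out ++ [b ++ "1"]) []
    (ndigit_binary_z (n - 1) (z - 1)).foldl (fun out b => out ++ [b ++ "0"]) out
termination_by n.toNat
decreasing_by all_goals omega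

-- ===== PORT B =====
-- the inner 'for cur in row' loop of Source B, carrying prev
def pvStepB (prev : List String) : List (List String) → List (List String)
  | [] => []
  | cur :: rest => (cur.map (· ++ "1") ++ prev.map (· ++ "0")) :: pvStepB cur rest

def ndigit_binary_z_alt (n : Int) (z : Int) : List String :=
  if z < 0 then []
  else if n < z then []
  else
    let row0 := (List.range (z + 1).toNat).map
      (fun k => if k = 0 then ["1"] else if k = 1 then ["0"] else ([] : List String))
    let row := (pvStepB [])^[(n - 1).toNat] row0
    (PySem.List.pyGet? row z).getD []   -- row[z]; z is in range whenever 1 ≤ n (Pre_), so never the default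

-- ===== PRECONDITION & SPEC =====
-- Pre_ excludes n < 1, on which Python A never returns (infinite recursion / RecursionError).
def Pre_ndigit_binary_z (n : Int) (z : Int) : Prop := 1 ≤ n
instance (n : Int) (z : Int) : Decidable (Pre_ndigit_binary_z n z) := by unfold Pre_ndigit_binary_z; infer_instance
def pvWitness_ndigit_binary_z : Int × Int := (3, 1)

def Spec_ndigit_binary_z (n : Int) (z : Int) (out : List String) : Prop := out = ndigit_binary_z_alt n z
instance (n : Int) (z : Int) (out : List String) : Decidable (Spec_ndigit_binary_z n z out) := by unfold Spec_ndigit_binary_z; infer_instance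

-- ===== CLAIM (what is proved, stated in full; the proofs are below) =====
def Claim_equal_ndigit_binary_z : Prop := ∀ (n : Int) (z : Int), Dom_ndigit_binary_z n z → Pre_ndigit_binary_z n z → Spec_ndigit_binary_z n z (ndigit_binary_z n z)

-- ===== LEMMAS AND PROOFS =====

-- A's append-loop is map-and-append
theorem pv_foldl_app (f : String → String) (l : List String) (acc : List String) :
    l.foldl (fun out b => out ++ [f b]) acc = acc ++ l.map f := by
  induction l generalizing acc with
  | nil => simp
  | cons x xs ih => simp [List.foldl, ih]

-- unfolding of A above the base case
theorem pv_A_unfold (n z : Int) (h : 1 < n) :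
    ndigit_binary_z n z =
      (ndigit_binary_z (n - 1) z).map (· ++ "1") ++ (ndigit_binary_z (n - 1) (z - 1)).map (· ++ "0") := by
  rw [ndigit_binary_z]
  have h1 : ¬ n = 1 := by omega
  have h2 : ¬ n < 1 := by omega
  simp only [if_neg h1, if_neg h2, pv_foldl_app, List.nil_append]

-- A returns [] for negative z
theorem pv_A_neg : ∀ (m : Nat) (n z : Int), n.toNat ≤ m → z < 0 → ndigit_binary_z n z = [] := by
  intro m
  induction m with
  | zero =>
    intro n z hn hz
    rw [ndigit_binary_z]
    have h1 : ¬ n = 1 := by omega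
    have h2 : n < 1 := by omega
    simp [h1, h2]
  | succ m ih =>
    intro n z hn hz
    by_cases h1 : n = 1
    · subst h1
      have hz0 : ¬ z = 0 := by omega
      have hz1 : ¬ z = 1 := by omega
      rw [ndigit_binary_z]
      simp [hz0, hz1]
    · by_cases h2 : n < 1
      · rw [ndigit_binary_z]; simp [h1, h2]
      · rw [pv_A_unfold n z (by omega)]
        rw [ih (n - 1) z (by omega) hz, ih (n - 1) (z - 1) (by omega) (by omega)]
        simp

-- A returns [] when z exceeds n (not enough positions for the zeros)
theorem pv_A_big : ∀ (m : Nat) (n z : Int), n.toNat ≤ m → n < z → ndigit_binary_z n z = [] := by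
  intro m
  induction m with
  | zero =>
    intro n z hn hz
    rw [ndigit_binary_z]
    have h1 : ¬ n = 1 := by omega
    have h2 : n < 1 := by omega
    simp [h1, h2]
  | succ m ih =>
    intro n z hn hz
    by_cases h1 : n = 1
    · subst h1
      have hz0 : ¬ z = 0 := by omega
      have hz1 : ¬ z = 1 := by omega
      rw [ndigit_binary_z]
      simp [hz0, hz1]
    · by_cases h2 : n < 1
      · rw [ndigit_binary_z]; simp [h1, h2]
      · rw [pv_A_unfold n z (by omega)]
        rw [ih (n - 1) z (by omega) (by omega), ih (n - 1) (z - 1) (by omega) (by omega)]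
        simp

-- the DP step on a row that is a map over a range
theorem pv_step_map (g : Nat → List String) : ∀ (L s : Nat),
    pvStepB (if s = 0 then [] else g (s - 1)) ((List.range' s L).map g)
      = (List.range' s L).map
          (fun k => (g k).map (· ++ "1") ++ (if k = 0 then ([] : List String) else g (k - 1)).map (· ++ "0")) := by
  intro L
  induction L with
  | zero => intro s; simp [pvStepB]
  | succ L ih =>
    intro s
    rw [List.range'_succ]
    simp only [List.map_cons, pvStepB]
    have hprev : g s = if s + 1 = 0 then [] else g (s + 1 - 1) := by simp
    rw [hprev, ih (s + 1)]

-- the row after m iterations holds A's values for length m+1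
theorem pv_row_inv (z : Int) : ∀ (m : Nat),
    (pvStepB [])^[m] ((List.range (z + 1).toNat).map
        (fun k => if k = 0 then ["1"] else if k = 1 then ["0"] else ([] : List String)))
      = (List.range (z + 1).toNat).map (fun (k : Nat) => ndigit_binary_z (1 + (m : Int)) (k : Int)) := by
  intro m
  induction m with
  | zero =>
    simp only [Function.iterate_zero, id]
    apply List.map_congr_left
    intro k _
    rw [ndigit_binary_z]
    by_cases h0 : k = 0
    · simp [h0]
    · by_cases h1 : k = 1
      · simp [h1]
      · have hk0 : ¬ ((k : Int) = 0) := by omega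
        have hk1 : ¬ ((k : Int) = 1) := by omega
        simp [h0, h1, hk0, hk1]
  | succ m ih =>
    rw [Function.iterate_succ_apply', ih]
    rw [List.range_eq_range']
    have h0 : ([] : List String) = if 0 = 0 then [] else
        (fun (k : Nat) => ndigit_binary_z (1 + (m : Int)) (k : Int)) (0 - 1) := by simp
    conv_lhs => rw [h0]
    rw [pv_step_map (fun (k : Nat) => ndigit_binary_z (1 + (m : Int)) (k : Int))]
    apply List.map_congr_left
    intro k _
    rw [pv_A_unfold (1 + ((m + 1 : Nat) : Int)) (k : Int) (by push_cast; omega)]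
    have harg : 1 + ((m + 1 : Nat) : Int) - 1 = 1 + (m : Int) := by push_cast; omega
    rw [harg]
    by_cases hk : k = 0
    · subst hk
      have hneg : ndigit_binary_z (1 + (m : Int)) (-1) = [] :=
        pv_A_neg (1 + m) _ _ (by omega) (by omega)
      simp [hneg]
    · have hcast : ((k : Int) - 1) = ((k - 1 : Nat) : Int) := by omega
      simp [hk, hcast]

-- ===== VERDICT (by name: the statement is the Claim_ definition above) =====
theorem ndigit_binary_z_spec : Claim_equal_ndigit_binary_z := by
  intro n z _ hpre
  have hn1 : 1 ≤ n := hpre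
  unfold Spec_ndigit_binary_z ndigit_binary_z_alt
  by_cases hz : z < 0
  · rw [if_pos hz, pv_A_neg n.toNat n z le_rfl hz]
  · rw [if_neg hz]
    by_cases hb : n < z
    · rw [if_pos hb, pv_A_big n.toNat n z le_rfl hb]
    · rw [if_neg hb]
      simp only []
      rw [pv_row_inv z ((n - 1).toNat)]
      have hz' : (0 : Int) ≤ z := by omega
      have hzlt : z.toNat < (z + 1).toNat := by omega
      rw [PySem.List.pyGet?_of_nonneg _ hz', List.getElem?_map, List.getElem?_range hzlt]
      have hzz : ((z.toNat : Nat) : Int) = z := by omega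
      simp [hzz]
      congr 1
      omega
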